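-- pv_equiv track=rewrite | github.com/Homo-data-analyticus/Homo-data-analyticus | playfair.py | playfairRuleFour
-- ===== SOURCE A (Python) =====
-- def playfairRuleFour(pair, list_lists):
--     '''
--     If the letters are not on the same row and not in the same column,
--     replace them with the letters on the same row respectively but in
--     the other pair of corners of the rectangle defined by the original
--     pair.  The order is important -- the first letter of the ciphertext
--     pair is the one that lies on the same row as the first letter of
--     the plaintext pair.
--
--     You can assume that the pair input received by this function will
--     be two characters long and already converted to lowercase, and
--     that the Playfair Table is valid.
--
--     Input:   string:         potentially modified bigram
--     Input:   list of lists:  ciphertable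
--     Output:  string:         potentially modified bigram
--     '''
--     new_pair = ''
--     first_letter_position = []
--     second_letter_position = []
--     new_first_position = []
--     new_second_position = []
--
--
--     #Gets the values of the lists
--     for lists in range(len(list_lists)):
--
--         #Gets the values of the sublists, individual values
--         for value in range(len(list_lists[lists])):
--
--             #Gets pairs and their individual letters
--             for letter in range(len(pair)-1):
--
--                 #If the string of values is equal to first letter in the pair, append to first_letter_position list
--                 if str(list_lists[lists][value]) == str(pair[letter]):
--                     first_letter_position.append(lists)
--                     first_letter_position.append(value)
--
--                 #If the string of values is equal to the second letter in the pair, append to second_letter_position list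
--                 if str(list_lists[lists][value]) == str(pair[letter+1]):
--                     second_letter_position.append(lists)
--                     second_letter_position.append(value)
--                 #Else pass
--                 else:
--                     pass
--
--
--
--     #Taking and swapping the positions
--     #Position in first_letter_position and second_letter_position and seeing the values of those.
--     for position in range(len(first_letter_position)-1):
--         for position in range(len(second_letter_position)-1):
--
--             #It is in 2 lists, first and second_letter_position to compare, get the corner values and swap them
--             #Take new first letter position and append the second_letter_position first position, or the x value
--             new_first_position.append(second_letter_position[position])
--             #Takes first_letter position of the y value and appends it and gets a new letter position list
--             new_first_position.append(first_letter_position[position+1])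
--
--             #new_second_position of the second character in the pair, appended first_letter_position's x-value
--             new_second_position.append(first_letter_position[position])
--             #new_second_postion of the second character in the pair, appended second_letter_position y-value
--             new_second_position.append(second_letter_position[position+1])
--
--
--
--     #Gets the list_lists values of the new_second_postition of its lists and its values to get a letter and appendes to new_pair
--     new_pair += list_lists[int(new_second_position[0])][int(new_second_position[1])]
--     new_pair += list_lists[int(new_first_position[0])][int(new_first_position[1])]
--
--     return new_pair
-- ===== SOURCE B (Python) =====
-- def playfairRuleFour(pair, list_lists):
--     '''Simpler: find the first table position holding one of the bigram's
--     leading letters and the first holding one of its trailing letters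
--     (for the documented two-character bigram: the positions of pair[0] and
--     pair[1]), then read the two opposite rectangle corners directly.'''
--     def find(letters):
--         for r, row in enumerate(list_lists):
--             for c, cell in enumerate(row):
--                 if cell in letters:
--                     return (r, c)
--         return None
--     r1, c1 = find(list(pair[:-1]))
--     r2, c2 = find(list(pair[1:]))
--     return list_lists[r1][c2] + list_lists[r2][c1]
-- ===== Notes on version B (the rewrite author's own statement) =====
-- stated objective: simpler
-- what changed: B replaces A's triple-nested table scan that accumulates flattened position lists plus the shadowed-index swap loops (quadratic in the number of letter matches) by a single early-return first-occurrence search per bigram side followed by one direct rectangle-corner lookup.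
import Mathlib
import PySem

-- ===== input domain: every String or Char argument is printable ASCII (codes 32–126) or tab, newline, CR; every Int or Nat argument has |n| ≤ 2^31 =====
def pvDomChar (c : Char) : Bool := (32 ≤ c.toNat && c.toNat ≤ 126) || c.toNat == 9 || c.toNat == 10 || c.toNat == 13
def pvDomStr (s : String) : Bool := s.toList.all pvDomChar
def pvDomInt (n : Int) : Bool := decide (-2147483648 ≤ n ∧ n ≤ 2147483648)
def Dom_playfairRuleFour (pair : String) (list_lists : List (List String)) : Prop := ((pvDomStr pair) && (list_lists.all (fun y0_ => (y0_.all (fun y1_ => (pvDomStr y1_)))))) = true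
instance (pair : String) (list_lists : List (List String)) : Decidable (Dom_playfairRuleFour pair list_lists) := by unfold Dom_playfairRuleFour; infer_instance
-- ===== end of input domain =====

-- B replaces A's triple-nested scan + swap loops by a first-occurrence search per bigram side and a direct corner lookup (simpler, same return value).


-- ===== PORT A =====
-- A-side helpers: each Python loop of A as a fold (the innermost letter loop, the per-row value loop, the table scan, and the position-swap loops)
def pvALetterLoop (chars : List Char) (lists value : Int) (row : List String) (st : List Int × List Int) : List Int × List Int :=
  (PySem.List.pyRange 0 (PySem.List.len chars - 1)).foldl
    (fun (st : List Int × List Int) letter =>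
      let cell := PySem.List.pyGetD row value ""
      let st1 :=
        if cell = String.ofList [PySem.List.pyGetD chars letter ' '] then
          (st.1 ++ [lists, value], st.2) else st
      if cell = String.ofList [PySem.List.pyGetD chars (letter + 1) ' '] then
        (st1.1, st1.2 ++ [lists, value]) else st1) st

def pvAValueLoop (chars : List Char) (lists : Int) (row : List String) (st : List Int × List Int) : List Int × List Int :=
  (PySem.List.pyRange 0 (PySem.List.len row)).foldl
    (fun st value => pvALetterLoop chars lists value row st) st

def pvAScan (chars : List Char) (tbl : List (List String)) : List Int × List Int :=
  (PySem.List.pyRange 0 (PySem.List.len tbl)).foldl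
    (fun st lists => pvAValueLoop chars lists (PySem.List.pyGetD tbl lists []) st) ([], [])

def pvASwap (flp slp : List Int) : List Int × List Int :=
  (PySem.List.pyRange 0 (PySem.List.len flp - 1)).foldl
    (fun (st : List Int × List Int) _position =>
      (PySem.List.pyRange 0 (PySem.List.len slp - 1)).foldl
        (fun (st : List Int × List Int) position =>
          (st.1 ++ [PySem.List.pyGetD slp position 0, PySem.List.pyGetD flp (position + 1) 0],
           st.2 ++ [PySem.List.pyGetD flp position 0, PySem.List.pyGetD slp (position + 1) 0])) st)
    (([] : List Int), ([] : List Int))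

def playfairRuleFour (pair : String) (list_lists : List (List String)) : String :=
  let chars := pair.toList
  let scan := pvAScan chars list_lists
  let flp := scan.1
  let slp := scan.2
  let swap := pvASwap flp slp
  let nfp := swap.1
  let nsp := swap.2
  PySem.List.pyGetD (PySem.List.pyGetD list_lists (PySem.List.pyGetD nsp 0 0) [])
      (PySem.List.pyGetD nsp 1 0) ""
    ++ PySem.List.pyGetD (PySem.List.pyGetD list_lists (PySem.List.pyGetD nfp 0 0) [])
      (PySem.List.pyGetD nfp 1 0) ""

-- ===== PORT B =====
-- B-side helpers: the early-return scan 'find(letters)' of Source B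
def pvFindRow (row : List String) (letters : List String) : Option Nat :=
  match row with
  | [] => none
  | cell :: rest => if cell ∈ letters then some 0 else (pvFindRow rest letters).map (· + 1)

def pvFind (tbl : List (List String)) (letters : List String) : Option (Nat × Nat) :=
  match tbl with
  | [] => none
  | row :: rest =>
    match pvFindRow row letters with
    | some c => some (0, c)
    | none => (pvFind rest letters).map (fun p => (p.1 + 1, p.2))

def playfairRuleFour_alt (pair : String) (list_lists : List (List String)) : String :=
  let firsts := pair.toList.dropLast.map (fun ch => String.ofList [ch])
  let seconds := (pair.toList.drop 1).map (fun ch => String.ofList [ch])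
  let p1 := (pvFind list_lists firsts).getD (0, 0)
  let p2 := (pvFind list_lists seconds).getD (0, 0)
  (list_lists.getD p1.1 []).getD p2.2 "" ++ (list_lists.getD p2.1 []).getD p1.2 ""

-- ===== PRECONDITION & SPEC =====
-- Spec-level occurrence lists (used only by Pre_ and the proofs): for a per-cell multiplicity g,
-- occRowM/occTblM list each position as many times as its cell is counted, in scan order.
def occRowM (g : String → Nat) (row : List String) (c : Int) : List Int :=
  match row with
  | [] => []
  | cell :: rest => List.replicate (g cell) c ++ occRowM g rest (c + 1)

def occTblM (g : String → Nat) (tbl : List (List String)) (r : Int) : List (Int × Int) :=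
  match tbl with
  | [] => []
  | row :: rest => (occRowM g row 0).map (fun c => (r, c)) ++ occTblM g rest (r + 1)

-- how many consecutive-letter pairs of the bigram string have a given cell as their first (resp. second) letter
def pvHits1 (ws : List (Char × Char)) (cell : String) : Nat := ws.countP (fun p => cell = String.ofList [p.1])
def pvHits2 (ws : List (Char × Char)) (cell : String) : Nat := ws.countP (fun p => cell = String.ofList [p.2])

-- Pre_ holds exactly where the Python A returns normally; it excludes only the inputs on which A raises
-- IndexError: no cell matching a trailing letter, more trailing-letter matches than leading-letter matches,
-- or a rectangle-corner index out of range in a ragged table.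
def Pre_playfairRuleFour (pair : String) (list_lists : List (List String)) : Prop :=
  occTblM (pvHits2 (pair.toList.zip pair.toList.tail)) list_lists 0 ≠ [] ∧
  (occTblM (pvHits2 (pair.toList.zip pair.toList.tail)) list_lists 0).length
    ≤ (occTblM (pvHits1 (pair.toList.zip pair.toList.tail)) list_lists 0).length ∧
  ((occTblM (pvHits2 (pair.toList.zip pair.toList.tail)) list_lists 0).headD (0, 0)).2.toNat
    < (list_lists.getD ((occTblM (pvHits1 (pair.toList.zip pair.toList.tail)) list_lists 0).headD (0, 0)).1.toNat []).length ∧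
  ((occTblM (pvHits1 (pair.toList.zip pair.toList.tail)) list_lists 0).headD (0, 0)).2.toNat
    < (list_lists.getD ((occTblM (pvHits2 (pair.toList.zip pair.toList.tail)) list_lists 0).headD (0, 0)).1.toNat []).length

instance (pair : String) (list_lists : List (List String)) : Decidable (Pre_playfairRuleFour pair list_lists) := by
  unfold Pre_playfairRuleFour; infer_instance

def pvWitness_playfairRuleFour : String × List (List String) := ("ab", [["a", "b"], ["c", "d"]])

def Spec_playfairRuleFour (pair : String) (list_lists : List (List String)) (out : String) : Prop := out = playfairRuleFour_alt pair list_lists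
instance (pair : String) (list_lists : List (List String)) (out : String) : Decidable (Spec_playfairRuleFour pair list_lists out) := by unfold Spec_playfairRuleFour; infer_instance

-- ===== CLAIM (what is proved, stated in full; the proofs are below) =====
def Claim_equal_playfairRuleFour : Prop := ∀ (pair : String) (list_lists : List (List String)), Dom_playfairRuleFour pair list_lists → Pre_playfairRuleFour pair list_lists → Spec_playfairRuleFour pair list_lists (playfairRuleFour pair list_lists)

-- ===== LEMMAS AND PROOFS =====

-- a fold that appends to both components of a pair is the pair of concatenations
lemma pvFoldlPairAppend {α : Type} (g1 g2 : α → List Int) (l : List α) (st : List Int × List Int) :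
    l.foldl (fun (st : List Int × List Int) p => (st.1 ++ g1 p, st.2 ++ g2 p)) st
      = (st.1 ++ l.flatMap g1, st.2 ++ l.flatMap g2) := by
  induction l generalizing st with
  | nil => simp
  | cons h t ih => simp [ih]

lemma pvZipFst (cs : List Char) : (cs.zip cs.tail).map Prod.fst = cs.dropLast := by
  induction cs with
  | nil => simp
  | cons c rest ih => cases rest <;> simp_all

lemma pvZipSnd (cs : List Char) : (cs.zip cs.tail).map Prod.snd = cs.drop 1 := by
  cases cs with
  | nil => simp
  | cons c rest => rw [List.drop_one]; exact List.map_snd_zip (by simp)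

-- the letter loop of A iterates exactly over the consecutive-letter pairs of the bigram string
lemma pvFoldlZip {β : Type} (cs : List Char) (G : β → Char → Char → β) (st : β) :
    (PySem.List.pyRange 0 (PySem.List.len cs - 1)).foldl
        (fun st l => G st (PySem.List.pyGetD cs l ' ') (PySem.List.pyGetD cs (l + 1) ' ')) st
      = (cs.zip cs.tail).foldl (fun st p => G st p.1 p.2) st := by
  cases cs with
  | nil =>
    rw [show PySem.List.len ([] : List Char) - 1 = -1 by simp [PySem.List.len]]
    rw [show PySem.List.pyRange 0 (-1) = [] by decide]
    simp
  | cons c rest =>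
    rw [show PySem.List.len (c :: rest) - 1 = PySem.List.len ((c :: rest).zip rest) by
      simp [PySem.List.len, List.length_zip]]
    rw [show (c :: rest).tail = rest from rfl]
    rw [PySem.List.foldl_congr_mem _ _
      (fun st l => G st (PySem.List.pyGetD ((c :: rest).zip rest) l (' ', ' ')).1
                        (PySem.List.pyGetD ((c :: rest).zip rest) l (' ', ' ')).2) st ?_]
    · have h := PySem.List.foldl_pyRange_pyGetD ((c :: rest).zip rest) ((' ', ' ') : Char × Char)
        (fun st (p : Char × Char) => G st p.1 p.2) st (a := 0) le_rfl
      simpa using h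
    · intro acc x hx
      rw [PySem.List.mem_pyRange_one] at hx
      obtain ⟨h0, h1⟩ := hx
      have hzlen : ((c :: rest).zip rest).length = rest.length := by simp [List.length_zip]
      have hxlt : x.toNat < ((c :: rest).zip rest).length := by
        simp [PySem.List.len] at h1
        omega
      have hcs : x < ((c :: rest).length : Int) := by simp; omega
      have hcs1 : x + 1 < ((c :: rest).length : Int) := by
        simp [PySem.List.len, hzlen] at h1 ⊢
        omega
      have hz : x < (((c :: rest).zip rest).length : Int) := by
        simpa [PySem.List.len] using h1
      show G acc (PySem.List.pyGetD (c :: rest) x ' ') (PySem.List.pyGetD (c :: rest) (x + 1) ' ')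
        = G acc (PySem.List.pyGetD ((c :: rest).zip rest) x (' ', ' ')).1
                (PySem.List.pyGetD ((c :: rest).zip rest) x (' ', ' ')).2
      rw [PySem.List.pyGetD_eq_getElem _ _ h0 hz]
      rw [PySem.List.pyGetD_eq_getElem _ ' ' h0 hcs]
      rw [PySem.List.pyGetD_eq_getElem _ ' ' (by omega) hcs1]
      have hx1 : (x + 1).toNat = x.toNat + 1 := by omega
      congr 1
      · rw [List.getElem_zip]
      · rw [List.getElem_zip]
        simp [hx1]

lemma pvALetterEval (chars : List Char) (lists value : Int) (row : List String) (st : List Int × List Int) :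
    pvALetterLoop chars lists value row st
      = (st.1 ++ (chars.zip chars.tail).flatMap
            (fun p => if PySem.List.pyGetD row value "" = String.ofList [p.1] then [lists, value] else []),
         st.2 ++ (chars.zip chars.tail).flatMap
            (fun p => if PySem.List.pyGetD row value "" = String.ofList [p.2] then [lists, value] else [])) := by
  unfold pvALetterLoop
  rw [pvFoldlZip chars (fun (st : List Int × List Int) x y =>
    let cell := PySem.List.pyGetD row value ""
    let st1 := if cell = String.ofList [x] then (st.1 ++ [lists, value], st.2) else st
    if cell = String.ofList [y] then (st1.1, st1.2 ++ [lists, value]) else st1) st]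
  rw [show (fun (st : List Int × List Int) (p : Char × Char) =>
      let cell := PySem.List.pyGetD row value ""
      let st1 := if cell = String.ofList [p.1] then (st.1 ++ [lists, value], st.2) else st
      if cell = String.ofList [p.2] then (st1.1, st1.2 ++ [lists, value]) else st1)
    = (fun (st : List Int × List Int) (p : Char × Char) =>
      (st.1 ++ (if PySem.List.pyGetD row value "" = String.ofList [p.1] then [lists, value] else []),
       st.2 ++ (if PySem.List.pyGetD row value "" = String.ofList [p.2] then [lists, value] else []))) by
    funext st p
    split_ifs <;> simp_all]
  rw [pvFoldlPairAppend]

lemma pvWsFlat1 (ws : List (Char × Char)) (cell : String) (Y : List Int) :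
    ws.flatMap (fun p => if cell = String.ofList [p.1] then Y else [])
      = (List.replicate (pvHits1 ws cell) Y).flatten := by
  unfold pvHits1
  induction ws with
  | nil => simp
  | cons w t ih =>
    simp only [List.flatMap_cons, List.countP_cons, ih]
    by_cases h : cell = String.ofList [w.1]
    · simp [h, List.replicate_succ]
    · simp [h]

lemma pvWsFlat2 (ws : List (Char × Char)) (cell : String) (Y : List Int) :
    ws.flatMap (fun p => if cell = String.ofList [p.2] then Y else [])
      = (List.replicate (pvHits2 ws cell) Y).flatten := by
  unfold pvHits2
  induction ws with
  | nil => simp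
  | cons w t ih =>
    simp only [List.flatMap_cons, List.countP_cons, ih]
    by_cases h : cell = String.ofList [w.2]
    · simp [h, List.replicate_succ]
    · simp [h]

lemma pvRepFlat (k : Nat) (r s : Int) :
    (List.replicate k ([r, s] : List Int)).flatten = (List.replicate k s).flatMap (fun c => [r, c]) := by
  induction k with
  | zero => simp
  | succ n ih => simp [List.replicate_succ, ih]

lemma pvRowFlat (g : String → Nat) (r : Int) (row : List String) (s : Int) :
    (PySem.List.enumerate row s).flatMap (fun q => (List.replicate (g q.2) ([r, q.1] : List Int)).flatten)
      = (occRowM g row s).flatMap (fun c => [r, c]) := by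
  induction row generalizing s with
  | nil => simp [occRowM, PySem.List.enumerate]
  | cons cell rest ih =>
    rw [PySem.List.enumerate_cons, List.flatMap_cons, ih,
      show occRowM g (cell :: rest) s = List.replicate (g cell) s ++ occRowM g rest (s + 1) from rfl,
      List.flatMap_append, pvRepFlat]

lemma pvTblFlat (g : String → Nat) (tbl : List (List String)) (s : Int) :
    (PySem.List.enumerate tbl s).flatMap
        (fun p => (occRowM g p.2 0).flatMap (fun c => [p.1, c]))
      = (occTblM g tbl s).flatMap (fun pc => [pc.1, pc.2]) := by
  induction tbl generalizing s with
  | nil => simp [occTblM, PySem.List.enumerate]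
  | cons row rest ih =>
    rw [PySem.List.enumerate_cons]
    simp [occTblM, ih, List.flatMap_map]

lemma pvFoldlEnum {α β : Type} (xs : List α) (d : α) (G : β → Int → α → β) (st : β) :
    (PySem.List.pyRange 0 (PySem.List.len xs)).foldl
        (fun st j => G st j (PySem.List.pyGetD xs j d)) st
      = (PySem.List.enumerate xs).foldl (fun st p => G st p.1 p.2) st := by
  rw [PySem.List.enumerate_eq_map_pyRange xs d, List.foldl_map]

lemma pvAValueEval (chars : List Char) (lists : Int) (row : List String) (st : List Int × List Int) :
    pvAValueLoop chars lists row st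
      = (st.1 ++ (occRowM (pvHits1 (chars.zip chars.tail)) row 0).flatMap (fun c => [lists, c]),
         st.2 ++ (occRowM (pvHits2 (chars.zip chars.tail)) row 0).flatMap (fun c => [lists, c])) := by
  unfold pvAValueLoop
  simp only [pvALetterEval]
  rw [pvFoldlEnum row "" (fun (st : List Int × List Int) j cell =>
    (st.1 ++ (chars.zip chars.tail).flatMap (fun p => if cell = String.ofList [p.1] then [lists, j] else []),
     st.2 ++ (chars.zip chars.tail).flatMap (fun p => if cell = String.ofList [p.2] then [lists, j] else [])))]
  simp only [pvWsFlat1, pvWsFlat2, pvFoldlPairAppend]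
  rw [pvRowFlat, pvRowFlat]

lemma pvAScanEval (chars : List Char) (tbl : List (List String)) :
    pvAScan chars tbl
      = ((occTblM (pvHits1 (chars.zip chars.tail)) tbl 0).flatMap (fun pc => [pc.1, pc.2]),
         (occTblM (pvHits2 (chars.zip chars.tail)) tbl 0).flatMap (fun pc => [pc.1, pc.2])) := by
  unfold pvAScan
  simp only [pvAValueEval]
  rw [pvFoldlEnum tbl [] (fun (st : List Int × List Int) j row =>
    (st.1 ++ (occRowM (pvHits1 (chars.zip chars.tail)) row 0).flatMap (fun c => [j, c]),
     st.2 ++ (occRowM (pvHits2 (chars.zip chars.tail)) row 0).flatMap (fun c => [j, c])))]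
  simp only [pvFoldlPairAppend]
  rw [pvTblFlat, pvTblFlat]
  simp

lemma pvOccRowHead (g : String → Nat) (letters : List String)
    (hiff : ∀ cell, 0 < g cell ↔ cell ∈ letters) (row : List String) (s : Int) :
    (occRowM g row s).head? = (pvFindRow row letters).map (fun c => s + (c : Int)) := by
  induction row generalizing s with
  | nil => simp [occRowM, pvFindRow]
  | cons cell rest ih =>
    by_cases h : cell ∈ letters
    · have hg : 0 < g cell := (hiff cell).mpr h
      cases hk : g cell with
      | zero => omega
      | succ n => simp [occRowM, pvFindRow, h, hk, List.replicate_succ]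
    · have hg : g cell = 0 := Nat.eq_zero_of_not_pos (fun hp => h ((hiff cell).mp hp))
      simp only [occRowM, pvFindRow, hg, List.replicate_zero, List.nil_append, if_neg h, ih]
      cases pvFindRow rest letters <;> simp
      ring

lemma pvOccTblHead (g : String → Nat) (letters : List String)
    (hiff : ∀ cell, 0 < g cell ↔ cell ∈ letters) (tbl : List (List String)) (s : Int) :
    (occTblM g tbl s).head? = (pvFind tbl letters).map (fun p => (s, (p.2 : Int)) + ((p.1 : Int), 0)) := by
  induction tbl generalizing s with
  | nil => simp [occTblM, pvFind]
  | cons row rest ih =>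
    cases h : pvFindRow row letters with
    | some c =>
      have hr := pvOccRowHead g letters hiff row 0
      rw [h] at hr
      cases hro : occRowM g row 0 with
      | nil => rw [hro] at hr; simp at hr
      | cons c0 t =>
        rw [hro] at hr
        simp at hr
        simp [occTblM, pvFind, h, hro, hr]
    | none =>
      have hr := pvOccRowHead g letters hiff row 0
      rw [h] at hr
      have hro : occRowM g row 0 = [] := by
        cases hq : occRowM g row 0 with
        | nil => rfl
        | cons c0 t => rw [hq] at hr; simp at hr
      simp only [occTblM, pvFind, h, hro, List.map_nil, List.nil_append, ih, Option.map_map]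
      congr 1
      funext p
      simp [Prod.ext_iff]
      omega

lemma pvHits1Iff (cs : List Char) (cell : String) :
    0 < pvHits1 (cs.zip cs.tail) cell ↔ cell ∈ cs.dropLast.map (fun ch => String.ofList [ch]) := by
  unfold pvHits1
  rw [List.countP_pos_iff]
  constructor
  · rintro ⟨p, hp, he⟩
    simp only [decide_eq_true_eq] at he
    refine List.mem_map.mpr ⟨p.1, ?_, he.symm⟩
    rw [← pvZipFst cs]
    exact List.mem_map_of_mem hp
  · intro hm
    obtain ⟨ch, hch, he⟩ := List.mem_map.mp hm
    rw [← pvZipFst cs] at hch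
    obtain ⟨p, hp, hfst⟩ := List.mem_map.mp hch
    exact ⟨p, hp, by simp [hfst, he]⟩

lemma pvHits2Iff (cs : List Char) (cell : String) :
    0 < pvHits2 (cs.zip cs.tail) cell ↔ cell ∈ (cs.drop 1).map (fun ch => String.ofList [ch]) := by
  unfold pvHits2
  rw [List.countP_pos_iff]
  constructor
  · rintro ⟨p, hp, he⟩
    simp only [decide_eq_true_eq] at he
    refine List.mem_map.mpr ⟨p.2, ?_, he.symm⟩
    rw [← pvZipSnd cs]
    exact List.mem_map_of_mem hp
  · intro hm
    obtain ⟨ch, hch, he⟩ := List.mem_map.mp hm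
    rw [← pvZipSnd cs] at hch
    obtain ⟨p, hp, hsnd⟩ := List.mem_map.mp hch
    exact ⟨p, hp, by simp [hsnd, he]⟩

lemma pvASwapEval (flp slp : List Int) (h1 : 2 ≤ flp.length) (h2 : 2 ≤ slp.length) :
    ∃ u v : List Int,
      pvASwap flp slp
        = (PySem.List.pyGetD slp 0 0 :: PySem.List.pyGetD flp 1 0 :: u,
           PySem.List.pyGetD flp 0 0 :: PySem.List.pyGetD slp 1 0 :: v) := by
  unfold pvASwap
  simp only [pvFoldlPairAppend]
  have ho : PySem.List.pyRange 0 (PySem.List.len flp - 1)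
      = 0 :: PySem.List.pyRange (0 + 1) (PySem.List.len flp - 1) :=
    PySem.List.pyRange_one_cons (by simp [PySem.List.len]; omega)
  have hi : PySem.List.pyRange 0 (PySem.List.len slp - 1)
      = 0 :: PySem.List.pyRange (0 + 1) (PySem.List.len slp - 1) :=
    PySem.List.pyRange_one_cons (by simp [PySem.List.len]; omega)
  rw [ho, hi]
  simp only [List.flatMap_cons, List.cons_append, List.nil_append, zero_add]
  exact ⟨_, _, rfl⟩

-- A's port, evaluated in closed form under the precondition
lemma pvPortAClosed (pair : String) (tbl : List (List String))
    (pA pB : Nat × Nat)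
    (hA : pvFind tbl (pair.toList.dropLast.map (fun ch => String.ofList [ch])) = some pA)
    (hB : pvFind tbl ((pair.toList.drop 1).map (fun ch => String.ofList [ch])) = some pB) :
    playfairRuleFour pair tbl
      = (tbl.getD pA.1 []).getD pB.2 "" ++ (tbl.getD pB.1 []).getD pA.2 "" := by
  have hA' := pvOccTblHead (pvHits1 (pair.toList.zip pair.toList.tail)) _
    (pvHits1Iff pair.toList) tbl 0
  have hB' := pvOccTblHead (pvHits2 (pair.toList.zip pair.toList.tail)) _
    (pvHits2Iff pair.toList) tbl 0
  rw [hA] at hA'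
  rw [hB] at hB'
  obtain ⟨ta, hta⟩ : ∃ t, occTblM (pvHits1 (pair.toList.zip pair.toList.tail)) tbl 0
      = ((pA.1 : Int), (pA.2 : Int)) :: t := by
    cases ho : occTblM (pvHits1 (pair.toList.zip pair.toList.tail)) tbl 0 with
    | nil => rw [ho] at hA'; simp at hA'
    | cons h t =>
      rw [ho] at hA'
      simp [Prod.ext_iff] at hA'
      exact ⟨t, by rw [(Prod.ext_iff.mpr hA' : h = ((pA.1 : Int), (pA.2 : Int)))]⟩
  obtain ⟨tb, htb⟩ : ∃ t, occTblM (pvHits2 (pair.toList.zip pair.toList.tail)) tbl 0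
      = ((pB.1 : Int), (pB.2 : Int)) :: t := by
    cases ho : occTblM (pvHits2 (pair.toList.zip pair.toList.tail)) tbl 0 with
    | nil => rw [ho] at hB'; simp at hB'
    | cons h t =>
      rw [ho] at hB'
      simp [Prod.ext_iff] at hB'
      exact ⟨t, by rw [(Prod.ext_iff.mpr hB' : h = ((pB.1 : Int), (pB.2 : Int)))]⟩
  unfold playfairRuleFour
  simp only [pvAScanEval, hta, htb, List.flatMap_cons, List.cons_append, List.nil_append]
  obtain ⟨u, v, hsw⟩ := pvASwapEval
    ((pA.1 : Int) :: (pA.2 : Int) :: ta.flatMap (fun pc => [pc.1, pc.2]))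
    ((pB.1 : Int) :: (pB.2 : Int) :: tb.flatMap (fun pc => [pc.1, pc.2]))
    (by simp) (by simp)
  rw [hsw]
  have e0 : ∀ (x y : Int) (l : List Int), PySem.List.pyGetD (x :: y :: l) 0 0 = x := by
    intro x y l; simp [pysem]
  have e1 : ∀ (x y : Int) (l : List Int), PySem.List.pyGetD (x :: y :: l) 1 0 = y := by
    intro x y l; simp [pysem]
  rw [e0, e1, e0, e1, e0, e1, e0, e1]
  rw [PySem.List.pyGetD_natCast, PySem.List.pyGetD_natCast, PySem.List.pyGetD_natCast, PySem.List.pyGetD_natCast]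

-- ===== VERDICT (by name: the statement is the Claim_ definition above) =====
theorem playfairRuleFour_spec : Claim_equal_playfairRuleFour := by
  intro pair tbl _dom hpre
  obtain ⟨hne, hle, _, _⟩ := hpre
  have hBsome : ∃ pB, pvFind tbl ((pair.toList.drop 1).map (fun ch => String.ofList [ch])) = some pB := by
    have h := pvOccTblHead (pvHits2 (pair.toList.zip pair.toList.tail)) _
      (pvHits2Iff pair.toList) tbl 0
    cases hf : pvFind tbl ((pair.toList.drop 1).map (fun ch => String.ofList [ch])) with
    | some p => exact ⟨p, rfl⟩
    | none => rw [hf] at h; simp at h; exact absurd h hne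
  have hAne : occTblM (pvHits1 (pair.toList.zip pair.toList.tail)) tbl 0 ≠ [] := by
    intro h0
    rw [h0] at hle
    simp at hle
    exact hne hle
  have hAsome : ∃ pA, pvFind tbl (pair.toList.dropLast.map (fun ch => String.ofList [ch])) = some pA := by
    have h := pvOccTblHead (pvHits1 (pair.toList.zip pair.toList.tail)) _
      (pvHits1Iff pair.toList) tbl 0
    cases hf : pvFind tbl (pair.toList.dropLast.map (fun ch => String.ofList [ch])) with
    | some p => exact ⟨p, rfl⟩
    | none => rw [hf] at h; simp at h; exact absurd h hAne
  obtain ⟨pA, hA⟩ := hAsome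
  obtain ⟨pB, hB⟩ := hBsome
  unfold Spec_playfairRuleFour
  rw [pvPortAClosed pair tbl pA pB hA hB]
  simp only [playfairRuleFour_alt]
  rw [hA, hB]
  rfl
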